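-- pv_equiv track=rewrite | github.com/ZeRori4/IDP | IDP_06-12-2024/block_1/strings/task_05.py | duble_letter_string
-- ===== SOURCE A (Python) =====
-- def duble_letter_string(string):
--     result = []
--     for letter in string:
--         if letter.isalnum():
--             letter = letter + letter
--             result.append(letter)
--         else:
--             if letter.isspace():
--                 result.append(letter)
--     return "".join(result)
-- ===== SOURCE B (Python) =====
-- def duble_letter_string(string):
--     table = {ord(c): (c + c if c.isalnum() else (c if c.isspace() else None))
--              for c in set(string)}
--     return string.translate(table)
-- ===== Notes on version B (the rewrite author's own statement) =====
-- stated objective: idiomatic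
-- what changed: Replaced the explicit accumulate-into-list loop with a translation table built over the string's distinct characters (ord(c) -> doubled char / char / None) applied via str.translate.
import Mathlib
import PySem

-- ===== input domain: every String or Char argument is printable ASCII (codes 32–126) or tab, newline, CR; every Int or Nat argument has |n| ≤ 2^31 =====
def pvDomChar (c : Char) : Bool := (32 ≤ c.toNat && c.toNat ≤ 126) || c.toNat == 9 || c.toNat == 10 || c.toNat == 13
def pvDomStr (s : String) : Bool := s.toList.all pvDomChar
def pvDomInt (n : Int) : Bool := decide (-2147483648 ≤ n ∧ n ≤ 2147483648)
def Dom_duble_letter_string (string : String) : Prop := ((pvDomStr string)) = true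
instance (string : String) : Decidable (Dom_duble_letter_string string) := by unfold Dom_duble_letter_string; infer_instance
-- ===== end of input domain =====

-- B replaces A's accumulate-into-list loop by a translation table over the string's
-- distinct characters plus a single str.translate pass (idiomatic; same cost).

-- ===== PORT A =====
-- literal transliteration of A: append pieces to a result list, then "".join(result)
def duble_letter_string (string : String) : String :=
  let result : List String :=
    string.toList.foldl (fun acc letter =>
      if PySem.Chars.isalnum letter then acc ++ [String.ofList [letter, letter]]
      else if PySem.Chars.isspace letter then acc ++ [String.ofList [letter]]
      else acc) []
  PySem.Str.join "" result

-- ===== PORT B =====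
-- per-character table value: c+c if alnum, c if space, None otherwise
def dlsEntry (c : Char) : Option String :=
  if PySem.Chars.isalnum c then some (String.ofList [c, c])
  else if PySem.Chars.isspace c then some (String.ofList [c])
  else none

-- the maketrans table: ord(c) ↦ dlsEntry c, over set(string)
def dlsTable (l : List Char) : PySem.Dict Int (Option String) :=
  (PySem.Set.ofList l).foldl (fun d c => d.insert (Int.ofNat c.toNat) (dlsEntry c)) (PySem.Dict.mk [])

-- str.translate: a mapped string replaces the char, None drops it, a missing key keeps it
def duble_letter_string_alt (string : String) : String :=
  let table := dlsTable string.toList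
  String.ofList ((string.toList.map (fun c =>
    match table.get? (Int.ofNat c.toNat) with
    | some (some r) => r.toList
    | some none => []
    | none => [c])).flatten)

-- ===== PRECONDITION & SPEC =====
def Spec_duble_letter_string (string : String) (out : String) : Prop := out = duble_letter_string_alt string
instance (string : String) (out : String) : Decidable (Spec_duble_letter_string string out) := by unfold Spec_duble_letter_string; infer_instance

-- ===== CLAIM (what is proved, stated in full; the proofs are below) =====
def Claim_equal_duble_letter_string : Prop := ∀ (string : String), Dom_duble_letter_string string → Spec_duble_letter_string string (duble_letter_string string)

-- ===== LEMMAS AND PROOFS =====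

-- ord is injective on Char
theorem dls_ord_inj {c y : Char} (h : Int.ofNat c.toNat = Int.ofNat y.toNat) : c = y := by
  apply Char.ext; apply UInt32.toNat_inj.mp; exact Int.ofNat.inj h

-- an insert-loop with keys ord(c) leaves keys of chars not in the loop's list untouched
theorem dlsTable_get_not_mem (t : List Char) (d : PySem.Dict Int (Option String)) (c : Char)
    (hc : c ∉ t) :
    (t.foldl (fun d c => d.insert (Int.ofNat c.toNat) (dlsEntry c)) d).get? (Int.ofNat c.toNat)
      = d.get? (Int.ofNat c.toNat) := by
  induction t generalizing d with
  | nil => rfl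
  | cons y u ih =>
    simp only [List.foldl_cons]
    rw [ih _ (fun h => hc (List.mem_cons_of_mem _ h))]
    refine PySem.Dict.get?_insert_of_ne _ _ ?_
    intro h
    exact hc ((dls_ord_inj h) ▸ List.mem_cons_self)

-- the insert-loop answers dlsEntry c for every c in the loop's list
theorem dlsTable_get_mem (s : List Char) (d : PySem.Dict Int (Option String)) (c : Char)
    (hc : c ∈ s) :
    (s.foldl (fun d c => d.insert (Int.ofNat c.toNat) (dlsEntry c)) d).get? (Int.ofNat c.toNat)
      = some (dlsEntry c) := by
  induction s generalizing d with
  | nil => cases hc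
  | cons x t ih =>
    simp only [List.foldl_cons]
    by_cases hxt : c ∈ t
    · exact ih _ hxt
    · have hx : c = x := by
        rcases List.mem_cons.mp hc with h | h
        · exact h
        · exact absurd h hxt
      subst hx
      rw [dlsTable_get_not_mem t _ c hxt, PySem.Dict.get?_insert_self]

-- "".join: the empty-separator intercalate is flatten
theorem dls_intercalate_nil (pss : List (List Char)) : [].intercalate pss = pss.flatten := by
  induction pss with
  | nil => rfl
  | cons p t ih =>
    cases t with
    | nil => simp [List.intercalate]
    | cons q u =>
      have ih' : ([] : List Char).intercalate (q :: u) = (q :: u).flatten := ih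
      simp only [List.intercalate, List.intersperse] at ih' ⊢
      simp_all

-- the per-char contribution both programs produce
def dlsPiece (c : Char) : List Char :=
  if PySem.Chars.isalnum c then [c, c]
  else if PySem.Chars.isspace c then [c]
  else []

-- A's loop, characterised as a flatMap of per-char pieces
theorem dlsA_foldl (l : List Char) (acc : List String) :
    l.foldl (fun acc letter =>
      if PySem.Chars.isalnum letter then acc ++ [String.ofList [letter, letter]]
      else if PySem.Chars.isspace letter then acc ++ [String.ofList [letter]]
      else acc) acc
    = acc ++ l.flatMap (fun c =>
        if PySem.Chars.isalnum c then [String.ofList [c, c]]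
        else if PySem.Chars.isspace c then [String.ofList [c]]
        else []) := by
  induction l generalizing acc with
  | nil => simp
  | cons x t ih =>
    simp only [List.foldl_cons, List.flatMap_cons]
    by_cases h1 : PySem.Chars.isalnum x
    · simp [h1, ih]
    · by_cases h2 : PySem.Chars.isspace x <;> simp [h1, h2, ih]

-- A's piece list, flattened back to chars, is flatMap dlsPiece
theorem dlsA_chars (l : List Char) :
    ((l.flatMap (fun c =>
        if PySem.Chars.isalnum c then [String.ofList [c, c]]
        else if PySem.Chars.isspace c then [String.ofList [c]]
        else [])).map String.toList).flatten
      = l.flatMap dlsPiece := by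
  induction l with
  | nil => rfl
  | cons x t ih =>
    simp only [List.flatMap_cons, List.map_append, List.flatten_append, ih, dlsPiece]
    by_cases h1 : PySem.Chars.isalnum x
    · simp [h1]
    · by_cases h2 : PySem.Chars.isspace x <;> simp [h1, h2]

-- ===== VERDICT (by name: the statement is the Claim_ definition above) =====
theorem duble_letter_string_spec : Claim_equal_duble_letter_string := by
  intro s _
  unfold Spec_duble_letter_string duble_letter_string duble_letter_string_alt
  apply String.toList_inj.mp
  rw [dlsA_foldl]
  simp only [List.nil_append]
  have hjoin : ∀ parts : List String,
      (PySem.Str.join "" parts).toList = (parts.map String.toList).flatten := by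
    intro parts
    have := PySem.Str.toList_join "" parts
    simp only [this, PySem.Chars.join]
    simp [dls_intercalate_nil]
  rw [hjoin, dlsA_chars]
  simp only [String.toList_ofList]
  rw [← List.flatMap_def]
  apply List.flatMap_congr
  intro c hc
  have htab : (dlsTable s.toList).get? (Int.ofNat c.toNat) = some (dlsEntry c) := by
    unfold dlsTable
    exact dlsTable_get_mem _ _ c ((PySem.Set.mem_ofList _ _).mpr hc)
  rw [htab]
  unfold dlsEntry dlsPiece
  by_cases h1 : PySem.Chars.isalnum c
  · simp [h1]
  · by_cases h2 : PySem.Chars.isspace c <;> simp [h1, h2]
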